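-- pv_equiv track=rewrite | github.com/Momentum-Team-11/python-mystery-word-ryanurbanski | mystery_word.py | location_list
-- ===== SOURCE A (Python) =====
-- def location_list(letter, word):
--     """Returns a list of the locations that letter occurs"""
--     locations = []
--     i = 0
--     while i < len(word):
--         for c in word:
--             if c == letter:
--                 locations.append(i)
--                 i += 1
--             else:
--                 i += 1
--     return locations
-- ===== SOURCE B (Python) =====
-- def location_list(letter, word):
--     """Returns a list of the locations that letter occurs"""
--     index = {}
--     for i, c in enumerate(word):
--         index.setdefault(c, []).append(i)
--     return index.get(letter, [])
-- ===== Notes on version B (the rewrite author's own statement) =====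
-- stated objective: alternative
-- what changed: B replaces A's nested while/for filtering scan with a build-an-index phase (one pass over enumerate(word) grouping indices per character into a dict) followed by a single dict lookup with [] default.
import Mathlib
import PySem

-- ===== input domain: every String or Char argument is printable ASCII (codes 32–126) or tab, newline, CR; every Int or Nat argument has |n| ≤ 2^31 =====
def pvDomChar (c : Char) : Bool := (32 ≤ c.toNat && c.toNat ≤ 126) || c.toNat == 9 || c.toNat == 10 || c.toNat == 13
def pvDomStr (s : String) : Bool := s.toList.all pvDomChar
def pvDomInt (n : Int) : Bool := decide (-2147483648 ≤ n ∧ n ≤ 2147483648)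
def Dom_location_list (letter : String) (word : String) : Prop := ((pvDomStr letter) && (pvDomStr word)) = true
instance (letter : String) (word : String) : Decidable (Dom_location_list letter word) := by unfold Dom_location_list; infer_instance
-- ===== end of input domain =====

-- B replaces A's nested while/for filtering scan with a per-character index table built in
-- one pass over enumerate(word), then a single lookup with [] default (objective: alternative).

-- ===== PORT A =====
-- inner 'for c in word' loop: state = (locations, i)
def llInner (letter : String) (chars : List Char) (s : List Int × Nat) : List Int × Nat :=
  chars.foldl
    (fun s c => if String.mk [c] = letter then (s.1 ++ [(s.2 : Int)], s.2 + 1) else (s.1, s.2 + 1))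
    s

-- the inner loop always advances i by len(word) (used for termination of the while loop)
theorem llInner_snd (letter : String) (chars : List Char) (locs : List Int) (i : Nat) :
    (llInner letter chars (locs, i)).2 = i + chars.length := by
  induction chars generalizing locs i with
  | nil => simp [llInner]
  | cons c cs ih =>
      simp only [llInner, List.foldl] at ih ⊢
      split <;> simpa using by rw [ih]; omega

-- outer 'while i < len(word)' loop
def llWhile (letter : String) (chars : List Char) (locs : List Int) (i : Nat) : List Int :=
  if _h : i < chars.length then
    let s := llInner letter chars (locs, i)
    llWhile letter chars s.1 s.2
  else locs
termination_by chars.length - i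
decreasing_by
  simp only [llInner_snd]
  omega

def location_list (letter : String) (word : String) : List Int :=
  llWhile letter word.toList [] 0

-- ===== PORT B =====
def location_list_alt (letter : String) (word : String) : List Int :=
  -- index.setdefault(c, []).append(i)  ==  index[c] = index.get(c, []) + [i], i.e. Dict.modify
  let index := (PySem.List.enumerate word.toList 0).foldl
    (fun (d : PySem.Dict String (List Int)) p =>
      d.modify (String.mk [p.2]) [] (· ++ [p.1]))
    PySem.Dict.empty
  (index.get? letter).getD []

-- ===== PRECONDITION & SPEC =====
def Spec_location_list (letter : String) (word : String) (out : List Int) : Prop := out = location_list_alt letter word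
instance (letter : String) (word : String) (out : List Int) : Decidable (Spec_location_list letter word out) := by unfold Spec_location_list; infer_instance

-- ===== CLAIM (what is proved, stated in full; the proofs are below) =====
def Claim_equal_location_list : Prop := ∀ (letter : String) (word : String), Dom_location_list letter word → Spec_location_list letter word (location_list letter word)

-- ===== LEMMAS AND PROOFS =====

-- reference value: the indices (from i on) at which letter occurs
def idxs (letter : String) : List Char → Int → List Int
  | [], _ => []
  | c :: cs, i => if String.mk [c] = letter then i :: idxs letter cs (i + 1) else idxs letter cs (i + 1)

theorem llInner_fst (letter : String) (chars : List Char) (locs : List Int) (i : Nat) :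
    (llInner letter chars (locs, i)).1 = locs ++ idxs letter chars (i : Int) := by
  induction chars generalizing locs i with
  | nil => simp [llInner, idxs]
  | cons c cs ih =>
      simp only [llInner, List.foldl] at ih ⊢
      by_cases h : String.mk [c] = letter
      · simp [h, idxs, ih]
      · simp [h, idxs, ih]

theorem location_list_eq_idxs (letter : String) (word : String) :
    location_list letter word = idxs letter word.toList 0 := by
  unfold location_list
  rcases h : word.toList with _ | ⟨c, cs⟩
  · rw [llWhile]; simp [idxs]
  · rw [llWhile]
    simp only [List.length_cons]
    rw [dif_pos (by omega)]
    have h1 := llInner_fst letter (c :: cs) [] 0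
    have h2 := llInner_snd letter (c :: cs) [] 0
    rw [llWhile]
    rw [dif_neg (by omega)]
    simpa using h1

theorem foldB (letter : String) (l : List (Int × Char)) (d : PySem.Dict String (List Int)) :
    ((l.foldl
      (fun (d : PySem.Dict String (List Int)) p =>
        d.modify (String.mk [p.2]) [] (· ++ [p.1])) d).getD letter [])
      = d.getD letter [] ++ (l.filter (fun p => String.mk [p.2] = letter)).map (·.1) := by
  induction l generalizing d with
  | nil => simp
  | cons p ps ih =>
      simp only [List.foldl, List.filter]
      by_cases h : String.mk [p.2] = letter
      · rw [ih]
        rw [PySem.Dict.getD_modify]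
        simp [h.symm]
      · rw [ih, PySem.Dict.getD_modify, if_neg (fun hh => h hh.symm)]
        simp [h]

theorem filter_enumerate_eq_idxs (letter : String) (cs : List Char) (s : Int) :
    ((PySem.List.enumerate cs s).filter (fun p => String.mk [p.2] = letter)).map (·.1)
      = idxs letter cs s := by
  induction cs generalizing s with
  | nil => simp [PySem.List.enumerate_nil, idxs]
  | cons c cs ih =>
      rw [PySem.List.enumerate_cons]
      by_cases h : String.mk [c] = letter
      · simp [idxs, h, ih]
      · simp [idxs, h, ih]

theorem location_list_alt_eq_idxs (letter : String) (word : String) :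
    location_list_alt letter word = idxs letter word.toList 0 := by
  unfold location_list_alt
  rw [← PySem.Dict.getD_eq_get?_getD]
  rw [foldB]
  simp [filter_enumerate_eq_idxs]

-- ===== VERDICT (by name: the statement is the Claim_ definition above) =====
theorem location_list_spec : Claim_equal_location_list := by
  intro letter word _
  unfold Spec_location_list
  rw [location_list_eq_idxs, location_list_alt_eq_idxs]
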